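-- pv_equiv track=rewrite | github.com/AdhishMagic/ACAD-Assist | ai-layer/src/utils/document_enrichment.py | group_pages_by_metadata
-- ===== SOURCE A (Python) =====
-- from typing import Dict, List, Optional, Any, Generator
--
-- def group_pages_by_metadata(
--     pages: List[Dict[str, Any]]
-- ) -> Dict[str, List[Dict[str, Any]]]:
--     """
--     Group enriched pages by metadata field.
--
--     Useful for organizing or filtering pages by department, semester, etc.
--
--     Args:
--         pages: List of enriched pages (with metadata)
--
--     Returns:
--         Dict mapping metadata value to list of pages
--
--     Example:
--         >>> pages = [
--         ...     {"text": "...", "department": "CS", ...},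
--         ...     {"text": "...", "department": "CS", ...},
--         ...     {"text": "...", "department": "Math", ...},
--         ... ]
--         >>> by_dept = group_pages_by_metadata(pages)
--         >>> len(by_dept["CS"])
--         2
--     """
--     grouped = {}
--     for page in pages:
--         # Group by file_name and department
--         key = f"{page.get('file_name', 'unknown')} - {page.get('department', 'unknown')}"
--         if key not in grouped:
--             grouped[key] = []
--         grouped[key].append(page)
--
--     return grouped
-- ===== SOURCE B (Python) =====
-- def group_pages_by_metadata(pages):
--     keys = [f"{page.get('file_name', 'unknown')} - {page.get('department', 'unknown')}"
--             for page in pages]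
--     return {k: [page for page, kk in zip(pages, keys) if kk == k]
--             for k in dict.fromkeys(keys)}
-- ===== Notes on version B (the rewrite author's own statement) =====
-- stated objective: simpler
-- what changed: Replaces incremental dict accumulation (check-insert-append per page) by a two-phase comprehension: precompute each page's key, dedup the keys in first-appearance order with dict.fromkeys, and build each group by one filtering scan per distinct key.
import Mathlib
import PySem

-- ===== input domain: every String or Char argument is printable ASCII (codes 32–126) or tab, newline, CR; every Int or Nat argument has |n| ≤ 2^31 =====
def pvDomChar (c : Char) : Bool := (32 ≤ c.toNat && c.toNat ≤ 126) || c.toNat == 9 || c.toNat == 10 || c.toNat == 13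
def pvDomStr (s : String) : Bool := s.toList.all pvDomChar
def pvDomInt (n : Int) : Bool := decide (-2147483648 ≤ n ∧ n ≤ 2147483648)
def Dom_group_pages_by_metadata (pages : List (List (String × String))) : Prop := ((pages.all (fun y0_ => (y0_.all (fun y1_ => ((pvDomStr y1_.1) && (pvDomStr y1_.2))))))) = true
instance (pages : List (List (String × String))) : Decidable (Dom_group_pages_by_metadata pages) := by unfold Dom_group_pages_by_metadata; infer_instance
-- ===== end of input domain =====

-- B groups by precomputing every page's key, deduplicating the keys in first-appearance
-- order, and filtering the pages once per distinct key (simpler decomposition; same result).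

-- the f-string key "{page.get('file_name','unknown')} - {page.get('department','unknown')}"
-- (shared verbatim by both Pythons)
def pvKey (page : List (String × String)) : String :=
  (PySem.Dict.mk page).getD "file_name" "unknown" ++ " - " ++
    (PySem.Dict.mk page).getD "department" "unknown"

-- ===== PORT A =====
-- grouped = {}; for page: if key not in grouped: grouped[key] = []; grouped[key].append(page)
def group_pages_by_metadata (pages : List (List (String × String))) : List (String × List (List (String × String))) :=
  (pages.foldl (fun grouped page =>
      let key := pvKey page
      let grouped := if grouped.contains key then grouped else grouped.insert key []
      grouped.modify key [] (fun l => l ++ [page]))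
    PySem.Dict.empty).items

-- ===== PORT B =====
def group_pages_by_metadata_alt (pages : List (List (String × String))) : List (String × List (List (String × String))) :=
  let keys := pages.map pvKey
  (PySem.List.dedup keys).map (fun k =>
    (k, ((pages.zip keys).filter (fun pk => pk.2 == k)).map (·.1)))

-- ===== PRECONDITION & SPEC =====
def Spec_group_pages_by_metadata (pages : List (List (String × String))) (out : List (String × List (List (String × String)))) : Prop := out = group_pages_by_metadata_alt pages
instance (pages : List (List (String × String))) (out : List (String × List (List (String × String)))) : Decidable (Spec_group_pages_by_metadata pages out) := by unfold Spec_group_pages_by_metadata; infer_instance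

-- ===== CLAIM (what is proved, stated in full; the proofs are below) =====
def Claim_equal_group_pages_by_metadata : Prop := ∀ (pages : List (List (String × String))), Dom_group_pages_by_metadata pages → Spec_group_pages_by_metadata pages (group_pages_by_metadata pages)

-- ===== LEMMAS AND PROOFS =====

-- A's guarded insert-then-append step equals a single modify with default []
theorem pv_step_eq (g : PySem.Dict String (List (List (String × String)))) (k : String)
    (p : List (String × String)) :
    (if g.contains k then g else g.insert k []).modify k [] (fun l => l ++ [p])
      = g.modify k [] (fun l => l ++ [p]) := by
  by_cases h : g.contains k
  · simp [h]
  · have hfalse : g.contains k = false := by simpa using h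
    have hk : ∀ q ∈ g.items, (q.1 == k) = false := by
      intro q hq
      simp only [beq_eq_false_iff_ne, ne_eq]
      intro he
      exact h ((PySem.Dict.contains_iff_mem_keys g k).mpr
        (he ▸ PySem.Dict.mem_keys_of_mem_items g hq))
    rw [if_neg h]
    apply PySem.Dict.ext
    show ((g.insert k []).insert k ((g.insert k []).getD k [] ++ [p])).items
        = (g.insert k (g.getD k [] ++ [p])).items
    rw [PySem.Dict.getD_insert_self, PySem.Dict.getD_of_not_contains g [] hfalse,
      PySem.Dict.items_insert_of_contains _ _ (PySem.Dict.contains_insert_self g k []),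
      PySem.Dict.items_insert_of_not_contains g _ hfalse,
      PySem.Dict.items_insert_of_not_contains g _ hfalse,
      List.map_append]
    simp only [List.map_cons, List.map_nil, beq_self_eq_true, if_true]
    rw [List.map_congr_left (g := id) (fun q hq => by simp [hk q hq]), List.map_id]

-- B's per-key group over zipped keys is a plain filter of the pages
theorem pv_zip_filter (pages : List (List (String × String))) (k : String) :
    ((pages.zip (pages.map pvKey)).filter (fun pk => pk.2 == k)).map (·.1)
      = pages.filter (fun p => pvKey p == k) := by
  induction pages with
  | nil => rfl
  | cons p ps ih =>
    by_cases h : pvKey p = k <;> simp [h, ih]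

-- ===== VERDICT (by name: the statement is the Claim_ definition above) =====

theorem group_pages_by_metadata_spec : Claim_equal_group_pages_by_metadata := by
  intro pages _
  unfold Spec_group_pages_by_metadata group_pages_by_metadata group_pages_by_metadata_alt
  -- rewrite A's fold step to the single-modify form
  have hfold :
      pages.foldl (fun grouped page =>
          let key := pvKey page
          let grouped := if grouped.contains key then grouped else grouped.insert key []
          grouped.modify key [] (fun l => l ++ [page])) PySem.Dict.empty
        = pages.foldl (fun g page => g.modify (pvKey page) [] (fun l => l ++ [page]))
            PySem.Dict.empty := by
    have hfun : (fun (grouped : PySem.Dict String (List (List (String × String)))) page =>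
        let key := pvKey page
        let grouped := if grouped.contains key then grouped else grouped.insert key []
        grouped.modify key [] (fun l => l ++ [page]))
          = (fun g page => g.modify (pvKey page) [] (fun l => l ++ [page])) := by
      funext g page
      exact pv_step_eq g (pvKey page) page
    rw [hfun]
  rw [hfold]
  set d := pages.foldl (fun g page => g.modify (pvKey page) [] (fun l => l ++ [page]))
      PySem.Dict.empty with hd
  have hnodup : d.keys.Nodup := by
    rw [hd]
    exact PySem.Dict.nodup_keys_foldl_modify_key pages pvKey [] (fun _ page l => l ++ [page])
      PySem.Dict.empty (by simp)
  have hkeys : d.keys = PySem.List.dedup (pages.map pvKey) := by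
    rw [hd, PySem.Dict.keys_foldl_modify_key, PySem.List.dedup_eq_ofList]
    simp [PySem.Set.update, PySem.Set.ofList, PySem.Dict.keys_empty]
  have hgetD : ∀ k, d.getD k [] = pages.filter (fun p => pvKey p == k) := by
    intro k
    have h1 : pages.foldl (fun g page => g.modify (pvKey page) [] (fun l => l ++ [page]))
          PySem.Dict.empty
        = (pages.map (fun p => (pvKey p, p))).foldl
            (fun d q => d.modify q.1 [] (fun l => l ++ [q.2])) PySem.Dict.empty :=
      by rw [List.foldl_map]
    rw [hd, h1, PySem.Dict.getD_foldl_modify_append]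
    simp [List.filter_map, List.map_map, Function.comp_def]
  -- items = keys.map (fun k => (k, getD k [])) when keys are nodup
  have hitems : d.items = d.keys.map (fun k => (k, d.getD k [])) := by
    have : ∀ p ∈ d.items, (p.1, d.getD p.1 []) = p := by
      intro p hp
      have := PySem.Dict.getD_of_mem_items (d := d) (k := p.1) (v := p.2) (d0 := [])
        (by simpa using hp) hnodup
      simp [this]
    calc d.items = d.items.map id := by simp
      _ = d.items.map (fun p => (p.1, d.getD p.1 [])) :=
          (List.map_congr_left (fun p hp => ((this p hp).symm))).symm ▸ rfl
      _ = d.keys.map (fun k => (k, d.getD k [])) := by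
          simp only [PySem.Dict.keys, List.map_map]; rfl
  rw [hitems, hkeys]
  apply List.map_congr_left
  intro k _
  rw [hgetD, pv_zip_filter]
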